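-- pv_equiv track=rewrite | github.com/JMarkoFlores/FinanzasApp | test_bono_calculo.py | generar_flujos_de_caja
-- ===== SOURCE A (Python) =====
-- def generar_flujos_de_caja(valor_nominal, cupon_periodico, num_periodos):
--     """Genera todos los flujos de caja del bono"""
--     flujos = []
--     for periodo in range(1, num_periodos + 1):
--         if periodo < num_periodos:
--             flujos.append(cupon_periodico)
--         else:
--             flujos.append(cupon_periodico + valor_nominal)
--     return flujos
-- ===== SOURCE B (Python) =====
-- def generar_flujos_de_caja(valor_nominal, cupon_periodico, num_periodos):
--     """Genera todos los flujos de caja del bono (construido de atras hacia adelante)"""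
--     flujos = []
--     restante = num_periodos
--     while restante > 0:
--         # the first element built is the FINAL period's flow (coupon + nominal)
--         flujos.append(cupon_periodico + valor_nominal if not flujos else cupon_periodico)
--         restante -= 1
--     return list(reversed(flujos))
-- ===== Notes on version B (the rewrite author's own statement) =====
-- stated objective: alternative
-- what changed: Builds the cash-flow list back-to-front with a countdown while-loop (the first element pushed is the final redemption flow, decided by whether the accumulator is still empty, not by a period index), then reverses it; A iterates periods forward and branches on the period index each step.
import Mathlib
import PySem

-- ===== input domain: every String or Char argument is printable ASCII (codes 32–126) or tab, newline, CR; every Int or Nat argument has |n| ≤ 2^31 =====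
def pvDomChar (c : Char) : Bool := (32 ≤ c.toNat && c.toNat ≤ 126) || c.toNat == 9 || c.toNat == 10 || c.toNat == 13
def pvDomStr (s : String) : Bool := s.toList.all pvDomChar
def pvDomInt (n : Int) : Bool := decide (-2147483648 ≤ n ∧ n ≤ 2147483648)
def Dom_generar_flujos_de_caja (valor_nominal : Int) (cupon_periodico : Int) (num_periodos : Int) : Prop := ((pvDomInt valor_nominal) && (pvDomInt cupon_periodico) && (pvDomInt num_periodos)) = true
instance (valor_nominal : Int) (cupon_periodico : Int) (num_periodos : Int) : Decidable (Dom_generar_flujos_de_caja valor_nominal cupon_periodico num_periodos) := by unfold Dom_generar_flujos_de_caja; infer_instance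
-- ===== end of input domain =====

-- B builds the list back-to-front with a countdown loop (last flow first, decided by emptiness of the accumulator) and reverses it; an alternative decomposition of the same O(n) task.


-- ===== PORT A =====
-- A: loop over range(1, num_periodos+1) appending cupon (or cupon+nominal on the last period)
def generar_flujos_de_caja (valor_nominal : Int) (cupon_periodico : Int) (num_periodos : Int) : List Int :=
  (PySem.List.pyRange 1 (num_periodos + 1) 1).foldl
    (fun flujos periodo =>
      flujos ++ [if periodo < num_periodos then cupon_periodico else cupon_periodico + valor_nominal])
    []

-- ===== PORT B =====
-- B's while-loop: countdown on restante, pushing cupon+nominal first (when flujos is still empty), then cupon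
def pvBLoop (valor_nominal cupon_periodico : Int) (restante : Int) (flujos : List Int) : List Int :=
  if 0 < restante then
    pvBLoop valor_nominal cupon_periodico (restante - 1)
      (flujos ++ [if flujos.isEmpty then cupon_periodico + valor_nominal else cupon_periodico])
  else flujos
termination_by restante.toNat
decreasing_by omega

def generar_flujos_de_caja_alt (valor_nominal : Int) (cupon_periodico : Int) (num_periodos : Int) : List Int :=
  (pvBLoop valor_nominal cupon_periodico num_periodos []).reverse

-- ===== PRECONDITION & SPEC =====
def Spec_generar_flujos_de_caja (valor_nominal : Int) (cupon_periodico : Int) (num_periodos : Int) (out : List Int) : Prop := out = generar_flujos_de_caja_alt valor_nominal cupon_periodico num_periodos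
instance (valor_nominal : Int) (cupon_periodico : Int) (num_periodos : Int) (out : List Int) : Decidable (Spec_generar_flujos_de_caja valor_nominal cupon_periodico num_periodos out) := by unfold Spec_generar_flujos_de_caja; infer_instance

-- ===== CLAIM =====
def Claim_equal_generar_flujos_de_caja : Prop := ∀ (valor_nominal : Int) (cupon_periodico : Int) (num_periodos : Int), Dom_generar_flujos_de_caja valor_nominal cupon_periodico num_periodos → Spec_generar_flujos_de_caja valor_nominal cupon_periodico num_periodos (generar_flujos_de_caja valor_nominal cupon_periodico num_periodos)

-- ===== LEMMAS AND PROOFS =====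

-- A's loop, characterized: the k coupons followed by the final coupon+nominal (for n with n.toNat = k+1)
theorem pvA_char (v c n : Int) (k : Nat) (hk : n.toNat = k + 1) :
    generar_flujos_de_caja v c n = List.replicate k c ++ [c + v] := by
  have hA : generar_flujos_de_caja v c n
      = List.map (fun j : Nat => if (1 + (j : Int)) < n then c else c + v) (List.range n.toNat) := by
    unfold generar_flujos_de_caja
    rw [PySem.List.foldl_append_singleton_eq_map, PySem.List.pyRange_one]
    simp only [add_sub_cancel_right, List.map_map, List.nil_append, Function.comp_def]
  have hn : n = (k : Int) + 1 := by omega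
  rw [hA, hk]
  apply List.ext_getElem
  · simp
  · intro i h1 h2
    simp only [List.length_map, List.length_range] at h1
    rw [List.getElem_map, List.getElem_range]
    by_cases hik : i < k
    · rw [if_pos (by push_cast [hn]; omega)]
      rw [List.getElem_append_left (by simpa using hik)]
      simp
    · rw [if_neg (by push_cast [hn]; omega)]
      rw [List.getElem_append_right (by simpa using hik)]
      simp

-- once the accumulator is non-empty, the loop only appends plain coupons
theorem pvBLoop_ne_nil (v c : Int) (r : Int) (fl : List Int) (h : fl ≠ []) :
    pvBLoop v c r fl = fl ++ List.replicate r.toNat c := by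
  by_cases hr : 0 < r
  · rw [pvBLoop, if_pos hr]
    rw [pvBLoop_ne_nil v c (r - 1) _ (by simp)]
    have hif : fl.isEmpty = false := by simp [h]
    have hr1 : r.toNat = (r - 1).toNat + 1 := by omega
    rw [hif, hr1, List.replicate_succ]
    simp
  · rw [pvBLoop, if_neg hr]
    have : r.toNat = 0 := by omega
    simp [this]
termination_by r.toNat
decreasing_by omega

theorem pv_eq (v c n : Int) :
    generar_flujos_de_caja v c n = generar_flujos_de_caja_alt v c n := by
  unfold generar_flujos_de_caja_alt
  rcases hk : n.toNat with _ | k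
  · have hn : ¬ 0 < n := by omega
    rw [pvBLoop, if_neg hn]
    unfold generar_flujos_de_caja
    have : PySem.List.pyRange 1 (n + 1) 1 = [] := by
      rw [PySem.List.pyRange_one]
      simp only [List.map_eq_nil_iff, List.range_eq_nil]
      omega
    simp [this]
  · rw [pvBLoop, if_pos (by omega : (0:Int) < n)]
    simp only [List.isEmpty_nil, if_pos, List.nil_append]
    rw [pvBLoop_ne_nil v c (n - 1) [c + v] (by simp)]
    have h1 : (n - 1).toNat = k := by omega
    rw [h1, pvA_char v c n k hk]
    simp

-- ===== VERDICT =====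
theorem generar_flujos_de_caja_spec : Claim_equal_generar_flujos_de_caja := by
  intro v c n _
  exact pv_eq v c n
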